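-- pv_equiv track=rewrite | github.com/NULLCT/richardtealy | main.py | cutUntilSlash
-- ===== SOURCE A (Python) =====
-- def cutUntilSlash(s: str) -> str:
--   res = ""
--   for i in range(len(s)-1,0,-1):
--     if s[i] == "/":
--       break
--     else:
--       res = s[i] + res
--
--   return res
-- ===== SOURCE B (Python) =====
-- def cutUntilSlash(s: str) -> str:
--   # Forward single pass: keep the current segment since the last slash,
--   # scanning indices 1..len(s)-1 (index 0 is never included, as in A).
--   res = ""
--   for i in range(1, len(s)):
--     if s[i] == "/":
--       res = ""
--     else:
--       res += s[i]
--   return res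
-- ===== Notes on version B (the rewrite author's own statement) =====
-- stated objective: faster
-- what changed: Replaces the backward scan from the end that prepends characters (res = s[i] + res, copying the accumulator each step) and breaks at the first slash with a forward single pass that appends to the current segment and resets it at every slash.
import Mathlib
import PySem

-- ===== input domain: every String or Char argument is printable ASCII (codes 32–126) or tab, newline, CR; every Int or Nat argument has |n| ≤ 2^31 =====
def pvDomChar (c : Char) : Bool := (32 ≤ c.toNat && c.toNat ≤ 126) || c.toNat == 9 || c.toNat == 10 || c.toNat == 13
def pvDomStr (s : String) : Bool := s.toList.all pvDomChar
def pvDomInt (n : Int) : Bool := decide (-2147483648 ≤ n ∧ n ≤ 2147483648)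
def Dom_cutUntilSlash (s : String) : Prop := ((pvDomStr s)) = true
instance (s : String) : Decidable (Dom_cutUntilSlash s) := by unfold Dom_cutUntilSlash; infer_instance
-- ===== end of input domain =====

-- B replaces A's backward scan-and-break at the last slash by a forward pass that
-- resets the accumulated segment at every slash; same return value on every string.

-- ===== PORT A =====
-- for i in range(len(s)-1, 0, -1): break at '/', else res = s[i] + res
def cutALoop (cs : List Char) : List Int → List Char → List Char
  | [], res => res
  | i :: is, res =>
    match PySem.List.pyGet? cs i with
    | none => res   -- unreachable: every i ∈ range(len(s)-1, 0, -1) is in range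
    | some c => if c = '/' then res else cutALoop cs is (c :: res)

def cutUntilSlash (s : String) : String :=
  String.ofList (cutALoop s.toList
    (PySem.List.pyRange ((s.toList.length : Int) - 1) 0 (-1)) [])

-- ===== PORT B =====
-- for i in range(1, len(s)): res = "" at '/', else res += s[i]
def cutUntilSlash_alt (s : String) : String :=
  String.ofList ((PySem.List.pyRange 1 (s.toList.length : Int) 1).foldl
    (fun res i =>
      match PySem.List.pyGet? s.toList i with
      | none => res   -- unreachable: every i ∈ range(1, len(s)) is in range
      | some c => if c = '/' then [] else res ++ [c]) [])

-- ===== PRECONDITION & SPEC =====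
def Spec_cutUntilSlash (s : String) (out : String) : Prop := out = cutUntilSlash_alt s
instance (s : String) (out : String) : Decidable (Spec_cutUntilSlash s out) := by unfold Spec_cutUntilSlash; infer_instance

-- ===== CLAIM (what is proved, stated in full; the proofs are below) =====
def Claim_equal_cutUntilSlash : Prop := ∀ (s : String), Dom_cutUntilSlash s → Spec_cutUntilSlash s (cutUntilSlash s)

-- ===== LEMMAS AND PROOFS =====

-- the segment after the last '/' of u
def tailSeg (u : List Char) : List Char := (u.reverse.takeWhile (· ≠ '/')).reverse

theorem tailSeg_append_singleton (u : List Char) (c : Char) :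
    tailSeg (u ++ [c]) = if c = '/' then [] else tailSeg u ++ [c] := by
  by_cases h : c = '/' <;> simp [tailSeg, h]

-- A's loop, over range(m, 0, -1) with m < |cs|, returns the segment after the
-- last slash among positions 1..m, prepended to the accumulator.
theorem cutALoop_range (cs : List Char) (m : Nat) (hm : m < cs.length) :
    ∀ res, cutALoop cs (PySem.List.pyRange (m : Int) 0 (-1)) res
      = tailSeg ((cs.drop 1).take m) ++ res := by
  induction m with
  | zero => intro res; simp [PySem.List.pyRange_neg_one_eq_nil, cutALoop, tailSeg]
  | succ m ih =>
    intro res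
    have hcons : PySem.List.pyRange ((m + 1 : Nat) : Int) 0 (-1)
        = ((m + 1 : Nat) : Int) :: PySem.List.pyRange (((m + 1 : Nat) : Int) - 1) 0 (-1) :=
      PySem.List.pyRange_neg_one_cons (by exact_mod_cast Nat.succ_pos m)
    have hidx : ((m + 1 : Nat) : Int) - 1 = ((m : Nat) : Int) := by push_cast; ring
    have hget : PySem.List.pyGet? cs ((m + 1 : Nat) : Int) = some cs[m + 1] := by
      rw [PySem.List.pyGet?_natCast, List.getElem?_eq_getElem hm]
    have htake : (cs.drop 1).take (m + 1) = (cs.drop 1).take m ++ [cs[m + 1]] := by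
      have hlt : m < (cs.drop 1).length := by simp; omega
      rw [List.take_add_one, List.getElem?_eq_getElem hlt]
      simp
    rw [hcons, hidx]
    simp only [cutALoop]
    rw [hget]
    dsimp only
    rw [htake, tailSeg_append_singleton]
    by_cases hc : cs[m + 1] = '/'
    · rw [if_pos hc, if_pos hc]; simp
    · rw [if_neg hc, if_neg hc, ih (by omega)]
      simp

-- B's fold is the plain left fold of the reset/append step over the tail of cs
theorem altFold_eq (cs : List Char) :
    (PySem.List.pyRange 1 (cs.length : Int) 1).foldl
      (fun res i =>
        match PySem.List.pyGet? cs i with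
        | none => res
        | some c => if c = '/' then [] else res ++ [c]) []
    = (cs.drop 1).foldl (fun res c => if c = '/' then [] else res ++ [c]) [] := by
  have h := PySem.List.foldl_pyRange_pyGetD' cs ' '
      (fun res c => if c = '/' then [] else res ++ [c]) [] (a := 1) (by norm_num)
  simp only [Int.toNat_one] at h
  rw [← h]
  apply PySem.List.foldl_congr_mem
  intro acc i hi
  have hi' := (PySem.List.mem_pyRange_one).1 hi
  have : PySem.List.pyGet? cs i = some (PySem.List.pyGetD cs i ' ') := by
    have h0 : 0 ≤ i := by omega
    have hlt : i.toNat < cs.length := by omega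
    simp [PySem.List.pyGet?, PySem.List.pyGetD, PySem.List.pyIdx?, h0, hi'.2]
  rw [this]

theorem foldl_reset_eq (t : List Char) :
    ∀ r, t.foldl (fun res c => if c = '/' then [] else res ++ [c]) r
      = if '/' ∈ t then tailSeg t else r ++ t := by
  induction t using List.reverseRecOn with
  | nil => intro r; simp
  | append_singleton u c ih =>
    intro r
    rw [List.foldl_append, List.foldl_cons, List.foldl_nil, ih, tailSeg_append_singleton]
    by_cases hc : c = '/'
    · subst hc; simp
    · have hc' : ¬ ('/' : Char) = c := fun h => hc h.symm
      by_cases hu : '/' ∈ u <;>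
        simp [hc, hc', hu]

theorem tailSeg_of_not_mem (t : List Char) (h : '/' ∉ t) : tailSeg t = t := by
  have hall : ∀ x ∈ t.reverse, (fun x => decide (x ≠ '/')) x = true := by
    intro x hx
    simp only [decide_eq_true_eq]
    exact fun hx' => h (by simpa [hx'] using List.mem_reverse.1 hx)
  unfold tailSeg
  rw [List.takeWhile_eq_self_iff.mpr hall, List.reverse_reverse]

-- ===== VERDICT (by name: the statement is the Claim_ definition above) =====
theorem cutUntilSlash_spec : Claim_equal_cutUntilSlash := by
  intro s _
  unfold Spec_cutUntilSlash cutUntilSlash cutUntilSlash_alt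
  rw [altFold_eq]
  set cs := s.toList with hcs
  rcases Nat.eq_zero_or_pos cs.length with hnil | hlen
  · rw [List.eq_nil_of_length_eq_zero hnil]
    simp [PySem.List.pyRange_neg_one_eq_nil, cutALoop]
  · have hm : ((cs.length : Int) - 1) = ((cs.length - 1 : Nat) : Int) := by
      push_cast [hlen]; ring
    rw [hm, cutALoop_range cs (cs.length - 1) (by omega), foldl_reset_eq]
    have hdrop : (cs.drop 1).take (cs.length - 1) = cs.drop 1 := by
      apply List.take_of_length_le; simp
    rw [hdrop, List.append_nil]
    by_cases h : '/' ∈ cs.drop 1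
    · rw [if_pos h]
    · rw [if_neg h, tailSeg_of_not_mem _ h, List.nil_append]
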